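-- pv_equiv track=rewrite | github.com/scibian/python-pyslurm | scripts/pyslurm_bindgen.py | capture_copyright
-- ===== SOURCE A (Python) =====
-- def capture_copyright(hdr_file):
--     out = []
--     for line in hdr_file:
--         if line.startswith("/"):
--             line = line.replace("/", "#").replace("\\", "")
--         line = line.replace("*", "#").lstrip()
--         out.append(line)
--         if "CODE-OCEC" in line:
--             break
--
--     return "".join(out)
-- ===== SOURCE B (Python) =====
-- def capture_copyright(hdr_file):
--     def fix(line):
--         if line.startswith("/"):
--             line = line.replace("/", "#").replace("\\", "")
--         return line.replace("*", "#").lstrip()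
--
--     fixed = [fix(line) for line in hdr_file]
--     cut = next((i for i, line in enumerate(fixed) if "CODE-OCEC" in line),
--                len(fixed) - 1)
--     return "".join(fixed[:cut + 1])
-- ===== Notes on version B (the rewrite author's own statement) =====
-- stated objective: alternative
-- what changed: Replaces the single loop-with-break by two passes: a comprehension that transforms every line, then a next/enumerate search for the first sentinel line and an inclusive slice that is joined.
import Mathlib
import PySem

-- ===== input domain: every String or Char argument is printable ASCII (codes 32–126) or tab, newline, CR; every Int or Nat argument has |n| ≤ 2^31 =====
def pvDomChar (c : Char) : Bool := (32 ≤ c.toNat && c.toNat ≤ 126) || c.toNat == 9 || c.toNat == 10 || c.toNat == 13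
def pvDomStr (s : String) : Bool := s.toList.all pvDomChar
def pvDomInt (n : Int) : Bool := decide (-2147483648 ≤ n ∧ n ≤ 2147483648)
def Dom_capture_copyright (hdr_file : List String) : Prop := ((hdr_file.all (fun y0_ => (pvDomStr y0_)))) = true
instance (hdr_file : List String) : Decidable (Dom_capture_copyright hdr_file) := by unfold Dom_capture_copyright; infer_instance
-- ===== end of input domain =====

-- B differs from A by decomposition only: two passes (map every line, then find the sentinel cutoff) instead of one loop with break.

-- ===== PORT A =====
-- the loop with break, accumulating the transformed lines
def captureLoopA : List String → List String
  | [] => []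
  | line :: rest =>
    let line1 := if PySem.Str.startswith line "/" then
        PySem.Str.replace (PySem.Str.replace line "/" "#") "\\" "" else line
    let line2 := PySem.Str.lstrip (PySem.Str.replace line1 "*" "#")
    if PySem.Str.isIn "CODE-OCEC" line2 then [line2] else line2 :: captureLoopA rest

def capture_copyright (hdr_file : List String) : String :=
  PySem.Str.join "" (captureLoopA hdr_file)

-- ===== PORT B =====
-- B's helper fix(line)
def fixLine (line : String) : String :=
  let line1 := if PySem.Str.startswith line "/" then
      PySem.Str.replace (PySem.Str.replace line "/" "#") "\\" "" else line
  PySem.Str.lstrip (PySem.Str.replace line1 "*" "#")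

def capture_copyright_alt (hdr_file : List String) : String :=
  let fixed := hdr_file.map fixLine
  let cut : Int := match fixed.findIdx? (fun l => PySem.Str.isIn "CODE-OCEC" l) with
    | some i => (i : Int)
    | none => (fixed.length : Int) - 1
  PySem.Str.join "" (PySem.List.slice fixed none (some (cut + 1)))

-- ===== PRECONDITION & SPEC =====
def Spec_capture_copyright (hdr_file : List String) (out : String) : Prop := out = capture_copyright_alt hdr_file
instance (hdr_file : List String) (out : String) : Decidable (Spec_capture_copyright hdr_file out) := by unfold Spec_capture_copyright; infer_instance

-- ===== CLAIM (what is proved, stated in full; the proofs are below) =====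
def Claim_equal_capture_copyright : Prop := ∀ (hdr_file : List String), Dom_capture_copyright hdr_file → Spec_capture_copyright hdr_file (capture_copyright hdr_file)

-- ===== LEMMAS AND PROOFS =====

-- A's loop produces exactly B's transformed list cut inclusively at the first sentinel line
theorem captureLoopA_eq (ls : List String) :
    captureLoopA ls =
      (match (ls.map fixLine).findIdx? (fun l => PySem.Str.isIn "CODE-OCEC" l) with
        | some i => (ls.map fixLine).take (i + 1)
        | none => ls.map fixLine) := by
  induction ls with
  | nil => rfl
  | cons l rest ih =>
    show (if PySem.Str.isIn "CODE-OCEC" (fixLine l) then [fixLine l]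
          else fixLine l :: captureLoopA rest) = _
    rw [List.map_cons, List.findIdx?_cons]
    by_cases h : PySem.Str.isIn "CODE-OCEC" (fixLine l)
    · rw [if_pos h, if_pos h]; rfl
    · rw [if_neg h, if_neg h, ih]
      cases hf : (rest.map fixLine).findIdx? (fun l => PySem.Str.isIn "CODE-OCEC" l) with
      | none => rfl
      | some i => rfl

theorem capture_copyright_spec : Claim_equal_capture_copyright := by
  intro hdr _
  show capture_copyright hdr = capture_copyright_alt hdr
  unfold capture_copyright capture_copyright_alt
  rw [captureLoopA_eq]
  cases hf : (hdr.map fixLine).findIdx? (fun l => PySem.Str.isIn "CODE-OCEC" l) with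
  | none =>
    simp only [hf]
    have h1 : ((hdr.map fixLine).length : Int) - 1 + 1 = (((hdr.map fixLine).length : Nat) : Int) := by ring
    rw [h1, PySem.List.slice_to_natCast, List.take_length]
  | some i =>
    simp only [hf]
    have h1 : (i : Int) + 1 = ((i + 1 : Nat) : Int) := by push_cast; ring
    rw [h1, PySem.List.slice_to_natCast]
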